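-- pv_equiv track=rewrite | github.com/vladdiethecoder/LaTeXify | src/latexify/self_improvement/generator.py | _balance_json
-- ===== SOURCE A (Python) =====
-- def _balance_json(text: str) -> str:
--     """
--     Naive brace/bracket balancer to close truncated JSON.
--     """
--     open_curly = 0
--     open_square = 0
--     for ch in text:
--         if ch == "{":
--             open_curly += 1
--         elif ch == "}":
--             open_curly = max(0, open_curly - 1)
--         elif ch == "[":
--             open_square += 1
--         elif ch == "]":
--             open_square = max(0, open_square - 1)
--     return text + ("]" * open_square) + ("}" * open_curly)
-- ===== SOURCE B (Python) =====
-- def _balance_json(text: str) -> str: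
--     def closers(opener, closer):
--         bal = 0
--         mn = 0
--         for ch in text:
--             if ch == opener:
--                 bal += 1
--             elif ch == closer:
--                 bal -= 1
--             if bal < mn:
--                 mn = bal
--         return bal - mn
--     return text + "]" * closers("[", "]") + "}" * closers("{", "}")
-- ===== Notes on version B (the rewrite author's own statement) =====
-- stated objective: alternative
-- what changed: Replaces the single pass with two clamped-at-zero counters by per-bracket-type passes tracking an unclamped running balance and its minimum (closers = final balance minus minimum), equal to the clamped count.
import Mathlib
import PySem

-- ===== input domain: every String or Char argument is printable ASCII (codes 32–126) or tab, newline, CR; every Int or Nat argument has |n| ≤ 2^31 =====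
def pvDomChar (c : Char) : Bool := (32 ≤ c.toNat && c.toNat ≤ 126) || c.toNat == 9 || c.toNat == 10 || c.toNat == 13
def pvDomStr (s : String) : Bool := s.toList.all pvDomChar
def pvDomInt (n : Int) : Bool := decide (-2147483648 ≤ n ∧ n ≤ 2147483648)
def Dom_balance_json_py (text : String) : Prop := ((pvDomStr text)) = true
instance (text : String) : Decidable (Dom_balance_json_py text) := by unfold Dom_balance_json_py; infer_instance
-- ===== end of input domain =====

-- B replaces A's single pass with two clamped counters by independent per-bracket passes
-- tracking an unclamped balance and its running minimum (objective: alternative algorithm).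

-- ===== PORT A =====
def balance_json_py (text : String) : String :=
  let s := text.toList.foldl
    (fun (st : Int × Int) ch =>
      if ch = '{' then (st.1 + 1, st.2)
      else if ch = '}' then (max 0 (st.1 - 1), st.2)
      else if ch = '[' then (st.1, st.2 + 1)
      else if ch = ']' then (st.1, max 0 (st.2 - 1))
      else st) (0, 0)
  text ++ String.ofList (List.replicate s.2.toNat ']') ++ String.ofList (List.replicate s.1.toNat '}')

-- ===== PORT B =====
-- helper `closers` of Source B: unclamped balance plus running minimum, result = bal - mn
def pvClosers (text : String) (opener closer : Char) : Int :=
  let p := text.toList.foldl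
    (fun (st : Int × Int) ch =>
      let b := if ch = opener then st.1 + 1 else if ch = closer then st.1 - 1 else st.1
      (b, min st.2 b)) (0, 0)
  p.1 - p.2

def balance_json_py_alt (text : String) : String :=
  text ++ String.ofList (List.replicate (pvClosers text '[' ']').toNat ']')
       ++ String.ofList (List.replicate (pvClosers text '{' '}').toNat '}')

-- ===== PRECONDITION & SPEC =====
def Spec_balance_json_py (text : String) (out : String) : Prop := out = balance_json_py_alt text
instance (text : String) (out : String) : Decidable (Spec_balance_json_py text out) := by unfold Spec_balance_json_py; infer_instance

-- ===== CLAIM (what is proved, stated in full; the proofs are below) =====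
def Claim_equal_balance_json_py : Prop := ∀ (text : String), Dom_balance_json_py text → Spec_balance_json_py text (balance_json_py text)

-- ===== LEMMAS AND PROOFS =====

-- A's joint fold splits into two independent clamped folds, one per bracket type.
theorem pvFold_split (l : List Char) (x y : Int) :
    l.foldl
      (fun (st : Int × Int) ch =>
        if ch = '{' then (st.1 + 1, st.2)
        else if ch = '}' then (max 0 (st.1 - 1), st.2)
        else if ch = '[' then (st.1, st.2 + 1)
        else if ch = ']' then (st.1, max 0 (st.2 - 1))
        else st) (x, y)
    = (l.foldl (fun (c : Int) ch => if ch = '{' then c + 1 else if ch = '}' then max 0 (c - 1) else c) x,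
       l.foldl (fun (c : Int) ch => if ch = '[' then c + 1 else if ch = ']' then max 0 (c - 1) else c) y) := by
  induction l generalizing x y with
  | nil => rfl
  | cons ch t ih =>
    simp only [List.foldl_cons]
    by_cases h1 : ch = '{'
    · subst h1; simpa using ih (x + 1) y
    · by_cases h2 : ch = '}'
      · subst h2; simpa using ih (max 0 (x - 1)) y
      · by_cases h3 : ch = '['
        · subst h3; simpa using ih x (y + 1)
        · by_cases h4 : ch = ']'
          · subst h4; simpa using ih x (max 0 (y - 1))
          · simp only [if_neg h1, if_neg h2, if_neg h3, if_neg h4]; exact ih x y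

-- Clamped counter = unclamped balance minus running minimum, for any matching start states.
theorem pvClamp_eq (o cl : Char) (l : List Char) (c b m : Int)
    (h1 : c = b - m) (h2 : m ≤ b) :
    l.foldl (fun (c : Int) ch => if ch = o then c + 1 else if ch = cl then max 0 (c - 1) else c) c
    = (l.foldl
        (fun (st : Int × Int) ch =>
          let b := if ch = o then st.1 + 1 else if ch = cl then st.1 - 1 else st.1
          (b, min st.2 b)) (b, m)).1
      - (l.foldl
        (fun (st : Int × Int) ch =>
          let b := if ch = o then st.1 + 1 else if ch = cl then st.1 - 1 else st.1
          (b, min st.2 b)) (b, m)).2 := by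
  induction l generalizing c b m with
  | nil => simpa using h1
  | cons ch t ih =>
    simp only [List.foldl_cons]
    by_cases ho : ch = o
    · subst ho
      simp only [if_pos rfl]
      exact ih (c + 1) (b + 1) (min m (b + 1)) (by omega) (by omega)
    · by_cases hc : ch = cl
      · subst hc
        simp only [if_neg ho, if_pos rfl]
        exact ih (max 0 (c - 1)) (b - 1) (min m (b - 1)) (by omega) (by omega)
      · simp only [if_neg ho, if_neg hc]
        exact ih c b (min m b) (by omega) (by omega)

-- ===== VERDICT (by name: the statement is the Claim_ definition above) =====
theorem balance_json_py_spec : Claim_equal_balance_json_py := by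
  intro text _
  unfold Spec_balance_json_py balance_json_py balance_json_py_alt pvClosers
  simp only [pvFold_split]
  rw [pvClamp_eq '{' '}' text.toList 0 0 0 (by omega) (by omega),
      pvClamp_eq '[' ']' text.toList 0 0 0 (by omega) (by omega)]
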